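-- pv_equiv track=rewrite | github.com/jasontan656/Otctopus_OS_AgentConsole | 7-Task-runtime-selfcheck/scripts/runtime_pain_repair_exec.py | _extract_sed_target
-- ===== SOURCE A (Python) =====
-- def _extract_sed_target(tokens: list[str]) -> str:
--     if len(tokens) < 3:
--         return ""
--
--     for token in reversed(tokens[1:]):
--         value = str(token or "").strip()
--         if value and value not in {"-", "--"} and not value.startswith("-"):
--             return value
--     return ""
-- ===== SOURCE B (Python) =====
-- def _extract_sed_target(tokens: list[str]) -> str:
--     if len(tokens) < 3:
--         return ""
--     result = ""
--     for token in tokens[1:]: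
--         value = str(token or "").strip()
--         if value and value not in {"-", "--"} and not value.startswith("-"):
--             result = value
--     return result
-- ===== Notes on version B (the rewrite author's own statement) =====
-- stated objective: alternative
-- what changed: Replaces A's reverse scan with early return by a forward fold over tokens[1:] keeping a 'last valid wins' accumulator that is overwritten on each valid token.
import Mathlib
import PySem

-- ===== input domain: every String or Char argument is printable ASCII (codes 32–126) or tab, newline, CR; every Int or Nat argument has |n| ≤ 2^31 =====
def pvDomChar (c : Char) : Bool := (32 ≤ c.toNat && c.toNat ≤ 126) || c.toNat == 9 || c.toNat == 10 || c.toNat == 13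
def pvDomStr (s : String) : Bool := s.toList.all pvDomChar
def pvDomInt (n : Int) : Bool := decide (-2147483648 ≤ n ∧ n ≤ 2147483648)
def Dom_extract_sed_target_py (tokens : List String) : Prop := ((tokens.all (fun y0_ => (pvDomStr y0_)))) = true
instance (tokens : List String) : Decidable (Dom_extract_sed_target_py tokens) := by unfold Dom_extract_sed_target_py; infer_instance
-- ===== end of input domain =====

-- B replaces A's reverse scan with early return by a forward fold keeping a 'last valid wins' accumulator (alternative decomposition, same cost).


-- ===== PORT A =====
-- value = str(token or "").strip()
def pvVal (token : String) : String :=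
  PySem.Str.strip (if token == "" then "" else token)

-- the if-condition: value and value not in {"-","--"} and not value.startswith("-")
def pvValid (value : String) : Bool :=
  !(value == "") && !(value == "-" || value == "--") && !(PySem.Str.startswith value "-")

-- the 'for token in reversed(tokens[1:])' loop with early return, fallback ""
def pvLoopA : List String → String
  | [] => ""
  | t :: ts =>
    let value := pvVal t
    if pvValid value then value else pvLoopA ts

def extract_sed_target_py (tokens : List String) : String :=
  if tokens.length < 3 then ""
  else pvLoopA (PySem.List.slice tokens (some 1) none).reverse

-- ===== PORT B =====
def extract_sed_target_py_alt (tokens : List String) : String :=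
  if tokens.length < 3 then ""
  else (PySem.List.slice tokens (some 1) none).foldl
    (fun result t =>
      let value := pvVal t
      if pvValid value then value else result) ""

-- ===== PRECONDITION & SPEC =====
def Spec_extract_sed_target_py (tokens : List String) (out : String) : Prop := out = extract_sed_target_py_alt tokens
instance (tokens : List String) (out : String) : Decidable (Spec_extract_sed_target_py tokens out) := by unfold Spec_extract_sed_target_py; infer_instance

-- ===== CLAIM (what is proved, stated in full; the proofs are below) =====
def Claim_equal_extract_sed_target_py : Prop := ∀ (tokens : List String), Dom_extract_sed_target_py tokens → Spec_extract_sed_target_py tokens (extract_sed_target_py tokens)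

-- ===== LEMMAS AND PROOFS =====

-- A's loop with an explicit fallback accumulator
def pvGoA (l : List String) (acc : String) : String :=
  match l with
  | [] => acc
  | t :: ts =>
    let value := pvVal t
    if pvValid value then value else pvGoA ts acc

theorem pvGoA_eq_loopA (l : List String) : pvGoA l "" = pvLoopA l := by
  induction l with
  | nil => rfl
  | cons t ts ih => simp [pvGoA, pvLoopA, ih]

theorem pvGoA_append_singleton (l : List String) (t : String) (acc : String) :
    pvGoA (l ++ [t]) acc =
      pvGoA l (if pvValid (pvVal t) then pvVal t else acc) := by
  induction l with
  | nil => rfl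
  | cons h hs ih => simp [pvGoA, ih]

theorem foldl_eq_goA_reverse (l : List String) (acc : String) :
    l.foldl (fun result t =>
      let value := pvVal t
      if pvValid value then value else result) acc = pvGoA l.reverse acc := by
  induction l generalizing acc with
  | nil => rfl
  | cons t ts ih =>
    simp only [List.foldl_cons, List.reverse_cons, ih, pvGoA_append_singleton]

-- ===== VERDICT (by name: the statement is the Claim_ definition above) =====
theorem extract_sed_target_py_spec : Claim_equal_extract_sed_target_py := by
  intro tokens _
  unfold Spec_extract_sed_target_py extract_sed_target_py extract_sed_target_py_alt
  by_cases h : tokens.length < 3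
  · simp [h]
  · simp [h, foldl_eq_goA_reverse, pvGoA_eq_loopA]
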